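-- pv_equiv track=rewrite | github.com/Scr1pting/42-BWInf-Runde-1 | Arukone.py | has_path_combination
-- ===== SOURCE A (Python) =====
-- def has_path_combination(all_paths: list, valid_path: list = [], index: int = 0):
--     paths = all_paths[index]
--
--     for path in paths:
--         if len(set(path) & set(valid_path)) == 0:
--             if index == len(all_paths) - 1:
--                 return True
--             else:
--                 value = has_path_combination(all_paths, valid_path + path, index + 1)
--                 if value == True: return True
--
--     return False
-- ===== SOURCE B (Python) =====
-- def has_path_combination(all_paths: list, valid_path: list = [], index: int = 0):
--     n = len(all_paths)
--     stack = [(index, set(valid_path))]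
--     while stack:
--         i, used = stack.pop()
--         if i == n:
--             return True
--         for path in all_paths[i]:
--             s = set(path)
--             if not (used & s):
--                 stack.append((i + 1, used | s))
--     return False
-- ===== Notes on version B (the rewrite author's own statement) =====
-- stated objective: alternative
-- what changed: Replaces A's recursion with early returns by an iterative DFS: a while loop popping an explicit stack of (next group index, used-set) states, seeding used as a set once instead of concatenating valid_path lists.
import Mathlib
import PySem

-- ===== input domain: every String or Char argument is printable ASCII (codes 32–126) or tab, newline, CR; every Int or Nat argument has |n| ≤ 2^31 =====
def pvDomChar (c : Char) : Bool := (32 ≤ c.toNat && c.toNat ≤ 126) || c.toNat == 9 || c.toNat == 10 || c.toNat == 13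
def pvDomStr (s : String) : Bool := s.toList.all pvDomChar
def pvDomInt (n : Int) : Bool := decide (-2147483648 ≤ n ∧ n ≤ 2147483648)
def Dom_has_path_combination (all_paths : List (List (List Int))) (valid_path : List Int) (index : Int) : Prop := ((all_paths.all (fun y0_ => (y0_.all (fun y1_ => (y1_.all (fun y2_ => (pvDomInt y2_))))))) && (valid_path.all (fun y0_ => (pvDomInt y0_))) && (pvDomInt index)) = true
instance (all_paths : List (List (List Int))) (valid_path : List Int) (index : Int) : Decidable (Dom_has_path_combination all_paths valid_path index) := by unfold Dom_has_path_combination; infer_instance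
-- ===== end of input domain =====

-- B replaces A's recursive backtracking by an iterative DFS: a while loop popping an
-- explicit stack of (next group index, used-set) states (objective: alternative).

-- ===== PORT A =====
-- Literal port of A's recursion; the Nat fuel only realises termination (2*len+1 always
-- suffices: wherever all_paths[index] does not raise, the recursion makes at most
-- len - index ≤ 2*len nested calls); pyGet? none = IndexError, excluded by Pre_.
def pvGoA (all_paths : List (List (List Int))) : Nat → List Int → Int → Bool
  | 0, _, _ => false
  | fuel+1, valid_path, index =>
    match PySem.List.pyGet? all_paths index with
    | none => false
    | some paths =>
      paths.any (fun path =>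
        if PySem.Set.len (PySem.Set.inter (PySem.Set.ofList path) (PySem.Set.ofList valid_path)) == 0 then
          if index == (all_paths.length : Int) - 1 then true
          else pvGoA all_paths fuel (valid_path ++ path) (index + 1)
        else false)

def has_path_combination (all_paths : List (List (List Int))) (valid_path : List Int) (index : Int) : Bool :=
  pvGoA all_paths (2 * all_paths.length + 1) valid_path index

-- ===== PORT B =====
-- fuel bookkeeping for the while loop: the loop pops one state per iteration, and the
-- number of states ever pushed is bounded by pvP of the visited group chain (Python
-- indices index..len-1, wrapping once for a negative index), a suffix of ap ++ ap.
def pvP : List (List (List Int)) → Nat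
  | [] => 1
  | g :: gs => (g.length + 1) * pvP gs

-- the while loop: pop (i, used); i = len means one path per group was chosen;
-- pyGet? none = IndexError exactly where Python B raises (excluded by Pre_)
def pvGoB (all_paths : List (List (List Int))) : Nat → List (Int × PySem.Set Int) → Bool
  | 0, _ => false
  | _+1, [] => false
  | fuel+1, (i, used) :: st =>
    if i == (all_paths.length : Int) then true
    else
      match PySem.List.pyGet? all_paths i with
      | none => false
      | some g =>
        pvGoB all_paths fuel (g.foldl (fun acc p =>
          if PySem.Set.len (PySem.Set.inter used (PySem.Set.ofList p)) == 0 then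
            (i + 1, PySem.Set.union used (PySem.Set.ofList p)) :: acc
          else acc) st)

def has_path_combination_alt (all_paths : List (List (List Int))) (valid_path : List Int) (index : Int) : Bool :=
  pvGoB all_paths (pvP (all_paths ++ all_paths) + 1) [(index, PySem.Set.ofList valid_path)]

-- ===== PRECONDITION & SPEC =====
-- exactly the inputs on which Python A returns: everywhere else all_paths[index]
-- raises IndexError (Python indexing: -len ≤ index < len)
def Pre_has_path_combination (all_paths : List (List (List Int))) (valid_path : List Int) (index : Int) : Prop :=
  -(all_paths.length : Int) ≤ index ∧ index < (all_paths.length : Int)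
instance (all_paths : List (List (List Int))) (valid_path : List Int) (index : Int) : Decidable (Pre_has_path_combination all_paths valid_path index) := by unfold Pre_has_path_combination; infer_instance

def pvWitness_has_path_combination : List (List (List Int)) × List Int × Int := ([[[1]], [[2]]], [], 0)

def Spec_has_path_combination (all_paths : List (List (List Int))) (valid_path : List Int) (index : Int) (out : Bool) : Prop := out = has_path_combination_alt all_paths valid_path index
instance (all_paths : List (List (List Int))) (valid_path : List Int) (index : Int) (out : Bool) : Decidable (Spec_has_path_combination all_paths valid_path index out) := by unfold Spec_has_path_combination; infer_instance

-- ===== CLAIM (what is proved, stated in full; the proofs are below) =====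
def Claim_equal_has_path_combination : Prop := ∀ (all_paths : List (List (List Int))) (valid_path : List Int) (index : Int), Dom_has_path_combination all_paths valid_path index → Pre_has_path_combination all_paths valid_path index → Spec_has_path_combination all_paths valid_path index (has_path_combination all_paths valid_path index)

-- ===== LEMMAS AND PROOFS =====

-- reference spec both ports are reduced to: from group i on, one path per group can be
-- chosen disjoint from the used set (fueled; any fuel > (len - i).toNat computes it)
def pvSelB (all_paths : List (List (List Int))) : Nat → Int → PySem.Set Int → Bool
  | 0, _, _ => false
  | fuel+1, i, u =>
    if i == (all_paths.length : Int) then true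
    else
      match PySem.List.pyGet? all_paths i with
      | none => false
      | some g =>
        g.any (fun p =>
          (PySem.Set.len (PySem.Set.inter u (PySem.Set.ofList p)) == 0) &&
          pvSelB all_paths fuel (i+1) (PySem.Set.union u (PySem.Set.ofList p)))

theorem pv_len_inter_eq_zero_iff (s t : List Int) :
    (PySem.Set.len (PySem.Set.inter s t) == 0) = true ↔ ∀ x ∈ s, x ∉ t := by
  simp [PySem.Set.len, PySem.Set.inter, List.filter_eq_nil_iff, List.length_eq_zero_iff]

theorem pv_selB_fuel (all_paths : List (List (List Int))) (f1 f2 : Nat) (i : Int) (u : PySem.Set Int)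
    (h1 : ((all_paths.length : Int) - i).toNat < f1) (h2 : ((all_paths.length : Int) - i).toNat < f2) :
    pvSelB all_paths f1 i u = pvSelB all_paths f2 i u := by
  induction f1 generalizing f2 i u with
  | zero => omega
  | succ f1 ih =>
    match f2 with
    | 0 => omega
    | f2+1 =>
      by_cases hn : i = (all_paths.length : Int)
      · rw [pvSelB, pvSelB, if_pos (by simp [hn]), if_pos (by simp [hn])]
      · cases hget : PySem.List.pyGet? all_paths i with
        | none => simp only [pvSelB, hget]
        | some g =>
          have hin : PySem.Raise.InRange all_paths.length i := by
            by_contra hc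
            rw [← PySem.List.pyGet?_eq_none_iff all_paths i] at hc
            rw [hget] at hc
            exact Option.some_ne_none g hc
          obtain ⟨hl, hr⟩ := hin
          simp only [pvSelB, hget]
          rw [if_neg (by simp [hn]), if_neg (by simp [hn])]
          congr 1
          funext p
          rw [ih f2 (i+1) _ (by omega) (by omega)]

theorem pv_selB_congr (all_paths : List (List (List Int))) (fuel : Nat) (i : Int)
    (u v : PySem.Set Int) (h : ∀ x, x ∈ u ↔ x ∈ v) :
    pvSelB all_paths fuel i u = pvSelB all_paths fuel i v := by
  induction fuel generalizing i u v with
  | zero => rfl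
  | succ fuel ih =>
    by_cases hn : i = (all_paths.length : Int)
    · rw [pvSelB, pvSelB, if_pos (by simp [hn]), if_pos (by simp [hn])]
    · cases hget : PySem.List.pyGet? all_paths i with
      | none => simp only [pvSelB, hget]
      | some g =>
        simp only [pvSelB, hget]
        rw [if_neg (by simp [hn]), if_neg (by simp [hn])]
        congr 1
        funext p
        have hc : (PySem.Set.len (PySem.Set.inter u (PySem.Set.ofList p)) == 0)
            = (PySem.Set.len (PySem.Set.inter v (PySem.Set.ofList p)) == 0) := by
          rw [Bool.eq_iff_iff, pv_len_inter_eq_zero_iff, pv_len_inter_eq_zero_iff]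
          exact ⟨fun hh x hx => hh x ((h x).mpr hx), fun hh x hx => hh x ((h x).mp hx)⟩
        rw [hc, ih (i+1) (PySem.Set.union u (PySem.Set.ofList p)) (PySem.Set.union v (PySem.Set.ofList p))
          (fun x => by simp only [PySem.Set.mem_union]; exact or_congr_left (h x))]

-- the chain of groups Python index i, i+1, …, len-1 visits (negative i wraps once)
def pvChain (all_paths : List (List (List Int))) (i : Int) : List (List (List Int)) :=
  (all_paths ++ all_paths).drop ((all_paths.length + i).toNat)

theorem pv_chain_head (all_paths : List (List (List Int))) (i : Int)
    (h0 : -(all_paths.length : Int) ≤ i) (h1 : i < (all_paths.length : Int)) :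
    ∃ g, PySem.List.pyGet? all_paths i = some g ∧ pvChain all_paths i = g :: pvChain all_paths (i+1) := by
  have hk : ((all_paths.length : Int) + i).toNat < (all_paths ++ all_paths).length := by
    rw [List.length_append]; omega
  refine ⟨(all_paths ++ all_paths)[((all_paths.length : Int) + i).toNat], ?_, ?_⟩
  · rw [PySem.List.pyGet?, PySem.List.pyIdx?]
    by_cases hi : 0 ≤ i
    · rw [if_pos hi, if_pos h1]
      have hlt : i.toNat < all_paths.length := by omega
      simp only [Option.bind_some]
      rw [List.getElem?_eq_getElem hlt]
      congr 1
      rw [List.getElem_append_right (by omega)]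
      congr 1
      omega
    · rw [if_neg hi, if_pos h0]
      have hlt : all_paths.length - (-i).toNat < all_paths.length := by omega
      simp only [Option.bind_some]
      rw [List.getElem?_eq_getElem hlt]
      congr 1
      rw [List.getElem_append_left (by omega)]
      congr 1
      omega
  · rw [pvChain, List.drop_eq_getElem_cons hk, pvChain]
    congr 2
    omega

-- search-tree size along a chain, and its product bound used as fuel
def pvT : List (List (List Int)) → Nat
  | [] => 1
  | g :: gs => 1 + g.length * pvT gs

theorem pv_pvP_pos (gs : List (List (List Int))) : 1 ≤ pvP gs := by
  induction gs with
  | nil => simp [pvP]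
  | cons g gs ih => rw [pvP]; exact Nat.le_mul_of_pos_left _ (by omega) |>.trans' (by nlinarith)

theorem pv_pvT_le_pvP (gs : List (List (List Int))) : pvT gs ≤ pvP gs := by
  induction gs with
  | nil => simp [pvT, pvP]
  | cons g gs ih =>
    rw [pvT, pvP]
    have := pv_pvP_pos gs
    nlinarith

theorem pv_pvP_drop_le (l : List (List (List Int))) (k : Nat) : pvP (l.drop k) ≤ pvP l := by
  induction l generalizing k with
  | nil => simp
  | cons g gs ih =>
    match k with
    | 0 => exact le_refl _
    | k+1 =>
      rw [List.drop_succ_cons, pvP]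
      exact (ih k).trans (Nat.le_mul_of_pos_left _ (by omega))

theorem pv_mu_push_le (all_paths : List (List (List Int))) (i : Int) (u : PySem.Set Int)
    (g : List (List Int)) (st : List (Int × PySem.Set Int)) :
    ((g.foldl (fun acc p =>
        if PySem.Set.len (PySem.Set.inter u (PySem.Set.ofList p)) == 0 then
          (i + 1, PySem.Set.union u (PySem.Set.ofList p)) :: acc
        else acc) st).map (fun s => pvT (pvChain all_paths s.1))).sum
      ≤ g.length * pvT (pvChain all_paths (i + 1))
        + (st.map (fun s => pvT (pvChain all_paths s.1))).sum := by
  induction g generalizing st with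
  | nil => simp
  | cons p g ih =>
    simp only [List.foldl_cons]
    refine le_trans (ih _) ?_
    split
    · simp only [List.map_cons, List.sum_cons, List.length_cons]
      ring_nf
      omega
    · simp only [List.length_cons]
      nlinarith [Nat.zero_le (pvT (pvChain all_paths (i + 1)))]

theorem pv_mem_foldl_push (all_paths : List (List (List Int))) (i : Int) (u : PySem.Set Int)
    (g : List (List Int)) (st : List (Int × PySem.Set Int)) (s : Int × PySem.Set Int)
    (hs : s ∈ g.foldl (fun acc p =>
        if PySem.Set.len (PySem.Set.inter u (PySem.Set.ofList p)) == 0 then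
          (i + 1, PySem.Set.union u (PySem.Set.ofList p)) :: acc
        else acc) st) :
    s ∈ st ∨ s.1 = i + 1 := by
  induction g generalizing st with
  | nil => exact Or.inl hs
  | cons p g ih =>
    simp only [List.foldl_cons] at hs
    rcases ih _ hs with h | h
    · split at h
      · rcases List.mem_cons.mp h with h' | h'
        · right; rw [h']
        · exact Or.inl h'
      · exact Or.inl h
    · exact Or.inr h

theorem pv_any_foldl_push (all_paths : List (List (List Int))) (i : Int) (u : PySem.Set Int)
    (P : Int × PySem.Set Int → Bool)
    (g : List (List Int)) (st : List (Int × PySem.Set Int)) :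
    (g.foldl (fun acc p =>
        if PySem.Set.len (PySem.Set.inter u (PySem.Set.ofList p)) == 0 then
          (i + 1, PySem.Set.union u (PySem.Set.ofList p)) :: acc
        else acc) st).any P
      = (g.any (fun p =>
          (PySem.Set.len (PySem.Set.inter u (PySem.Set.ofList p)) == 0) &&
          P (i + 1, PySem.Set.union u (PySem.Set.ofList p))) || st.any P) := by
  induction g generalizing st with
  | nil => simp
  | cons p g ih =>
    simp only [List.foldl_cons, List.any_cons]
    rw [ih]
    split
    · rename_i hb
      rw [List.any_cons, hb, Bool.true_and]
      cases P (i + 1, PySem.Set.union u (PySem.Set.ofList p)) <;>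
        cases g.any (fun p =>
          (PySem.Set.len (PySem.Set.inter u (PySem.Set.ofList p)) == 0) &&
          P (i + 1, PySem.Set.union u (PySem.Set.ofList p))) <;>
        cases st.any P <;> rfl
    · rename_i hb
      rw [Bool.not_eq_true] at hb
      rw [hb, Bool.false_and, Bool.false_or]

theorem pv_goA_eq_selB (all_paths : List (List (List Int))) (fuel : Nat) (i : Int) (v : List Int)
    (h0 : -(all_paths.length : Int) ≤ i) (h1 : i < (all_paths.length : Int))
    (hf : ((all_paths.length : Int) - i).toNat ≤ fuel) :
    pvGoA all_paths fuel v i = pvSelB all_paths (fuel + 1) i (PySem.Set.ofList v) := by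
  induction fuel generalizing i v with
  | zero => omega
  | succ fuel ih =>
    obtain ⟨g, hget, -⟩ := pv_chain_head all_paths i h0 h1
    rw [pvGoA, pvSelB]
    simp only [hget]
    rw [if_neg (by simp; omega)]
    congr 1
    funext p
    have hcond : (PySem.Set.len (PySem.Set.inter (PySem.Set.ofList p) (PySem.Set.ofList v)) == 0)
        = (PySem.Set.len (PySem.Set.inter (PySem.Set.ofList v) (PySem.Set.ofList p)) == 0) := by
      rw [Bool.eq_iff_iff, pv_len_inter_eq_zero_iff, pv_len_inter_eq_zero_iff]
      exact ⟨fun hh x hx hx' => hh x hx' hx, fun hh x hx hx' => hh x hx' hx⟩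
    rw [hcond]
    rcases Bool.eq_false_or_eq_true (PySem.Set.len (PySem.Set.inter (PySem.Set.ofList v) (PySem.Set.ofList p)) == 0) with hb | hb <;>
      rw [hb]
    · rw [Bool.true_and, if_pos rfl]
      by_cases hlast : i = (all_paths.length : Int) - 1
      · rw [if_pos (by simp [hlast])]
        rw [pvSelB, if_pos (by simp; omega)]
      · rw [if_neg (by simp; omega)]
        rw [ih (i + 1) (v ++ p) (by omega) (by omega) (by omega)]
        apply pv_selB_congr
        intro x
        simp [PySem.Set.mem_ofList, PySem.Set.mem_union]
    · rw [Bool.false_and, if_neg Bool.false_ne_true]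

theorem pv_goB_eq_any_selB (all_paths : List (List (List Int))) (fuel : Nat)
    (st : List (Int × PySem.Set Int))
    (hf : (st.map (fun s => pvT (pvChain all_paths s.1))).sum < fuel)
    (hinv : ∀ s ∈ st, -(all_paths.length : Int) ≤ s.1 ∧ s.1 ≤ (all_paths.length : Int)) :
    pvGoB all_paths fuel st
      = st.any (fun s => pvSelB all_paths (((all_paths.length : Int) - s.1).toNat + 1) s.1 s.2) := by
  induction fuel generalizing st with
  | zero => omega
  | succ fuel ih =>
    match st with
    | [] => rfl
    | (i, u) :: st' =>
      obtain ⟨hl, hr⟩ := hinv (i, u) (List.mem_cons_self)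
      by_cases hn : i = (all_paths.length : Int)
      · rw [pvGoB, if_pos (by simp [hn]), List.any_cons]
        rw [show pvSelB all_paths (((all_paths.length : Int) - i).toNat + 1) i u = true from by
          rw [pvSelB, if_pos (by simp [hn])]]
        rw [Bool.true_or]
      · obtain ⟨g, hget, hchain⟩ := pv_chain_head all_paths i hl (by omega)
        simp only [pvGoB, hget]
        rw [if_neg (by simp [hn])]
        have hT : pvT (pvChain all_paths i) = 1 + g.length * pvT (pvChain all_paths (i + 1)) := by
          rw [hchain, pvT]
        rw [ih _ (by
            refine lt_of_le_of_lt (pv_mu_push_le all_paths i u g st') ?_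
            simp only [List.map_cons, List.sum_cons, hT] at hf
            omega)
          (by
            intro s hs
            rcases pv_mem_foldl_push all_paths i u g st' s hs with h | h
            · exact hinv s (List.mem_cons_of_mem _ h)
            · rw [h]; constructor <;> omega)]
        have hm : ((all_paths.length : Int) - i).toNat = (((all_paths.length : Int) - (i + 1)).toNat + 1) := by
          omega
        have hhead : pvSelB all_paths (((all_paths.length : Int) - i).toNat + 1) i u
            = g.any (fun p =>
              (PySem.Set.len (PySem.Set.inter u (PySem.Set.ofList p)) == 0) &&
              pvSelB all_paths (((all_paths.length : Int) - (i + 1)).toNat + 1) (i + 1)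
                (PySem.Set.union u (PySem.Set.ofList p))) := by
          rw [hm, pvSelB]
          simp only [hget]
          rw [if_neg (by simp [hn])]
        simp only [List.any_cons]
        rw [pv_any_foldl_push all_paths i u
          (fun s => pvSelB all_paths (((all_paths.length : Int) - s.1).toNat + 1) s.1 s.2) g st', hhead]

-- ===== VERDICT (by name: the statement is the Claim_ definition above) =====
theorem has_path_combination_spec : Claim_equal_has_path_combination := by
  intro all_paths valid_path index _ hpre
  unfold Spec_has_path_combination
  obtain ⟨h0, h1⟩ := hpre
  rw [has_path_combination,
    pv_goA_eq_selB all_paths _ index valid_path h0 h1 (by omega)]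
  rw [has_path_combination_alt,
    pv_goB_eq_any_selB all_paths _ _ (by
      simp only [List.map_cons, List.map_nil, List.sum_cons, List.sum_nil, Nat.add_zero]
      calc pvT (pvChain all_paths index) ≤ pvP (pvChain all_paths index) := pv_pvT_le_pvP _
        _ ≤ pvP (all_paths ++ all_paths) := pv_pvP_drop_le _ _
        _ < pvP (all_paths ++ all_paths) + 1 := by omega)
    (by intro s hs; simp only [List.mem_singleton] at hs; rw [hs]; constructor <;> omega)]
  simp only [List.any_cons, List.any_nil, Bool.or_false]
  exact pv_selB_fuel all_paths _ _ index _ (by omega) (by omega)
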